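-- pv_equiv track=rewrite | github.com/aupc2061/Multi-LoRA | circuit_utils.py | build_timestep_windows
-- ===== SOURCE A (Python) =====
-- def build_timestep_windows(num_steps: int, window_size: int, stride: int) -> list[list[int]]:
--     if num_steps <= 0:
--         raise ValueError("num_steps must be positive")
--     if window_size <= 0:
--         raise ValueError("window_size must be positive")
--     if stride <= 0:
--         raise ValueError("stride must be positive")
--
--     windows: list[list[int]] = []
--     start = 0
--     while start < num_steps:
--         end = min(num_steps, start + window_size)
--         windows.append(list(range(start, end)))
--         if end == num_steps:
--             break
--         start += stride
--     return windows
-- ===== SOURCE B (Python) =====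
-- def build_timestep_windows(num_steps: int, window_size: int, stride: int) -> list[list[int]]:
--     if num_steps <= 0:
--         raise ValueError("num_steps must be positive")
--     if window_size <= 0:
--         raise ValueError("window_size must be positive")
--     if stride <= 0:
--         raise ValueError("stride must be positive")
--     imax = (num_steps - 1) // stride
--     kbreak = max(0, -(-(num_steps - window_size) // stride))
--     n = min(imax, kbreak) + 1
--     return [list(range(i * stride, min(num_steps, i * stride + window_size)))
--             for i in range(n)]
-- ===== Notes on version B (the rewrite author's own statement) =====
-- stated objective: alternative
-- what changed: Replaces A's break-driven while loop by a closed-form window count (floor/ceil division) followed by a single flat comprehension generating each window independently.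
import Mathlib
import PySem

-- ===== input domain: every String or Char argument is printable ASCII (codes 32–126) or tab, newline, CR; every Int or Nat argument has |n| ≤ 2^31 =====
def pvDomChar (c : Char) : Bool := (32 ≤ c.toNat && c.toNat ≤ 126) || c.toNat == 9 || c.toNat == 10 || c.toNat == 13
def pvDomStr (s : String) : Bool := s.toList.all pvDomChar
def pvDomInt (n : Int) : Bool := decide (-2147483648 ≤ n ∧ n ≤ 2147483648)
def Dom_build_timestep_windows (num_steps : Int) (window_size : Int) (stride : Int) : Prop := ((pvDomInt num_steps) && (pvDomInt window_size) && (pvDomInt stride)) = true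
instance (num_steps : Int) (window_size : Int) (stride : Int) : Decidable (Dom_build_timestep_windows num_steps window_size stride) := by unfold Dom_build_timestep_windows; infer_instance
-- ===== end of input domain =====

-- B replaces A's break-driven while loop by a closed-form window count plus one flat map (alternative decomposition, same cost).

-- ===== PORT A =====
-- the while loop of A: state (start, windows); the `0 < stride` conjunct in the guard
-- only makes the recursion total (Python raises before the loop when stride ≤ 0)
def buildLoopA (num_steps window_size stride : Int) (start : Int) (acc : List (List Int)) : List (List Int) :=
  if _h : start < num_steps ∧ 0 < stride then
    let e := min num_steps (start + window_size)
    let acc' := acc ++ [PySem.List.pyRange start e]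
    if e = num_steps then acc'
    else buildLoopA num_steps window_size stride (start + stride) acc'
  else acc
termination_by (num_steps - start).toNat
decreasing_by omega

def build_timestep_windows (num_steps : Int) (window_size : Int) (stride : Int) : List (List Int) :=
  if num_steps ≤ 0 ∨ window_size ≤ 0 ∨ stride ≤ 0 then []   -- Python raises ValueError here (outside Pre_)
  else buildLoopA num_steps window_size stride 0 []

-- ===== PORT B =====
def build_timestep_windows_alt (num_steps : Int) (window_size : Int) (stride : Int) : List (List Int) :=
  if num_steps ≤ 0 ∨ window_size ≤ 0 ∨ stride ≤ 0 then []   -- Python raises ValueError here (outside Pre_)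
  else
    let imax := PySem.Int.floordiv (num_steps - 1) stride
    let kbreak := max 0 (-(PySem.Int.floordiv (-(num_steps - window_size)) stride))
    let n := min imax kbreak + 1
    (PySem.List.pyRange 0 n).map
      (fun i => PySem.List.pyRange (i * stride) (min num_steps (i * stride + window_size)))

-- ===== PRECONDITION & SPEC =====
-- Pre_ excludes exactly the inputs on which A raises ValueError (a non-positive argument).
def Pre_build_timestep_windows (num_steps : Int) (window_size : Int) (stride : Int) : Prop :=
  0 < num_steps ∧ 0 < window_size ∧ 0 < stride
instance (num_steps : Int) (window_size : Int) (stride : Int) : Decidable (Pre_build_timestep_windows num_steps window_size stride) := by unfold Pre_build_timestep_windows; infer_instance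

def pvWitness_build_timestep_windows : Int × Int × Int := (10, 4, 3)

def Spec_build_timestep_windows (num_steps : Int) (window_size : Int) (stride : Int) (out : List (List Int)) : Prop := out = build_timestep_windows_alt num_steps window_size stride
instance (num_steps : Int) (window_size : Int) (stride : Int) (out : List (List Int)) : Decidable (Spec_build_timestep_windows num_steps window_size stride out) := by unfold Spec_build_timestep_windows; infer_instance

-- ===== CLAIM (what is proved, stated in full; the proofs are below) =====
def Claim_equal_build_timestep_windows : Prop := ∀ (num_steps : Int) (window_size : Int) (stride : Int), Dom_build_timestep_windows num_steps window_size stride → Pre_build_timestep_windows num_steps window_size stride → Spec_build_timestep_windows num_steps window_size stride (build_timestep_windows num_steps window_size stride)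

-- ===== LEMMAS AND PROOFS =====

-- index of the last window A produces, in B's closed form
def pvNLast (N w s : Int) : Int :=
  min (PySem.Int.floordiv (N - 1) s) (max 0 (-(PySem.Int.floordiv (-(N - w)) s)))

lemma pvNLast_imax {N s k : Int} (hs : 0 < s) :
    k ≤ PySem.Int.floordiv (N - 1) s ↔ k * s < N := by
  rw [PySem.Int.le_floordiv_iff_mul_le hs]; omega

lemma pvNLast_kbreak {N w s k : Int} (hs : 0 < s) :
    -(PySem.Int.floordiv (-(N - w)) s) ≤ k ↔ N - w ≤ k * s := by
  rw [neg_le, PySem.Int.le_floordiv_iff_mul_le hs, neg_mul]; omega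

-- at the last window index the loop appends exactly one window and stops
lemma buildLoopA_last (N w s : Int) (hs : 0 < s) (k : Int)
    (hkeq : k = pvNLast N w s) (acc : List (List Int)) :
    buildLoopA N w s (k * s) acc =
      acc ++ [PySem.List.pyRange (k * s) (min N (k * s + w))] := by
  have himax : k * s < N := (pvNLast_imax hs).mp (by unfold pvNLast at hkeq; omega)
  rw [buildLoopA, dif_pos ⟨himax, hs⟩]
  by_cases hend : min N (k * s + w) = N
  · simp [hend]
  · simp only [if_neg hend]
    have hlt : k * s + w < N := by omega
    have hkb : ¬ (-(PySem.Int.floordiv (-(N - w)) s) ≤ k) := by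
      rw [pvNLast_kbreak hs]; omega
    have himax' : k = PySem.Int.floordiv (N - 1) s := by
      unfold pvNLast at hkeq; omega
    have hnext : ¬ (k * s + s < N) := by
      have h2 : PySem.Int.floordiv (N - 1) s < k + 1 := by omega
      rw [PySem.Int.floordiv_lt_iff_lt_mul hs] at h2
      nlinarith
    rw [buildLoopA, dif_neg (by omega)]

-- the loop, started at the k-th window start, appends exactly windows k .. pvNLast
lemma buildLoopA_eq (N w s : Int) (hs : 0 < s) :
    ∀ (m : Nat) (k : Int) (acc : List (List Int)), 0 ≤ k → k ≤ pvNLast N w s →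
      (pvNLast N w s - k).toNat ≤ m →
    buildLoopA N w s (k * s) acc =
      acc ++ (PySem.List.pyRange k (pvNLast N w s + 1)).map
        (fun i => PySem.List.pyRange (i * s) (min N (i * s + w))) := by
  intro m
  induction m with
  | zero =>
    intro k acc hk0 hkle hm
    have hkeq : k = pvNLast N w s := by omega
    rw [buildLoopA_last N w s hs k hkeq acc,
        show pvNLast N w s + 1 = k + 1 by omega,
        PySem.List.pyRange_one_cons (by omega : k < k + 1),
        show PySem.List.pyRange (k + 1) (k + 1) = ([] : List Int) from by
          simp [PySem.List.pyRange]]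
    simp
  | succ m ih =>
    intro k acc hk0 hkle hm
    by_cases hkeq : k = pvNLast N w s
    · rw [buildLoopA_last N w s hs k hkeq acc,
          show pvNLast N w s + 1 = k + 1 by omega,
          PySem.List.pyRange_one_cons (by omega : k < k + 1),
          show PySem.List.pyRange (k + 1) (k + 1) = ([] : List Int) from by
            simp [PySem.List.pyRange]]
      simp
    · -- k < pvNLast: no break yet, one window then recurse
      have hklt : k < pvNLast N w s := by omega
      have himax : k * s < N := (pvNLast_imax hs).mp (by unfold pvNLast at hklt; omega)
      have hkb : ¬ (N - w ≤ k * s) := by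
        rw [← pvNLast_kbreak (N := N) (w := w) hs]
        unfold pvNLast at hklt; omega
      have hend : min N (k * s + w) ≠ N := by omega
      rw [buildLoopA, dif_pos ⟨himax, hs⟩]
      simp only [if_neg hend]
      have hrec := ih (k + 1) (acc ++ [PySem.List.pyRange (k * s) (min N (k * s + w))])
        (by omega) (by omega) (by omega)
      rw [show k * s + s = (k + 1) * s by ring, hrec,
          PySem.List.pyRange_one_cons (by omega : k < pvNLast N w s + 1)]
      simp

-- ===== VERDICT (by name: the statement is the Claim_ definition above) =====
theorem build_timestep_windows_spec : Claim_equal_build_timestep_windows := by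
  intro N w s _hdom ⟨hN, hw, hs⟩
  unfold Spec_build_timestep_windows build_timestep_windows build_timestep_windows_alt
  rw [if_neg (by omega), if_neg (by omega)]
  have h0 : (0 : Int) ≤ pvNLast N w s := by
    have h1 : (0 : Int) ≤ PySem.Int.floordiv (N - 1) s :=
      (PySem.Int.le_floordiv_iff_mul_le hs).mpr (by omega)
    unfold pvNLast; omega
  have h := buildLoopA_eq N w s hs (pvNLast N w s).toNat 0 [] le_rfl h0 (by omega)
  rw [zero_mul] at h
  rw [h]
  rfl
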